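-- pv_equiv track=rewrite | github.com/tcbegley/advent-of-code | 2025/day12.py | process_shape
-- ===== SOURCE A (Python) =====
-- def rotate(shape):
--     lookup = {
--         (0, 0): (0, 2),
--         (0, 1): (1, 2),
--         (0, 2): (2, 2),
--         (1, 0): (0, 1),
--         (1, 1): (1, 1),
--         (1, 2): (2, 1),
--         (2, 0): (0, 0),
--         (2, 1): (1, 0),
--         (2, 2): (2, 0),
--     }
--     return tuple(sorted(lookup[loc] for loc in shape))
--
-- def flip(shape):
--     lookup = {
--         (0, 0): (0, 2),
--         (0, 1): (0, 1),
--         (0, 2): (0, 0),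
--         (1, 0): (1, 2),
--         (1, 1): (1, 1),
--         (1, 2): (1, 0),
--         (2, 0): (2, 2),
--         (2, 1): (2, 1),
--         (2, 2): (2, 0),
--     }
--     return tuple(sorted(lookup[loc] for loc in shape))
--
-- def process_shape(shape):
--     shape = tuple(
--         (r, c)
--         for r, row in enumerate(shape.split("\n")[1:])
--         for c, val in enumerate(row)
--         if val == "#"
--     )
--     variants = {shape, flip(shape)}
--     for _ in range(3):
--         shape = rotate(shape)
--         variants.add(shape)
--         variants.add(flip(shape))
--
--     return variants
-- ===== SOURCE B (Python) =====
-- def process_shape(shape):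
--     pts = [
--         (r, c)
--         for r, row in enumerate(shape.split("\n")[1:])
--         for c, val in enumerate(row)
--         if val == "#"
--     ]
--     transforms = [
--         lambda r, c: (r, c),
--         lambda r, c: (r, 2 - c),
--         lambda r, c: (c, 2 - r),
--         lambda r, c: (c, r),
--         lambda r, c: (2 - r, 2 - c),
--         lambda r, c: (2 - r, c),
--         lambda r, c: (2 - c, r),
--         lambda r, c: (2 - c, 2 - r),
--     ]
--     return {tuple(sorted(t(r, c) for r, c in pts)) for t in transforms}
-- ===== Notes on version B (the rewrite author's own statement) =====
-- stated objective: simpler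
-- what changed: B replaces A's chained rotate()/flip() passes (each a 9-entry dict lookup over the points plus a re-sort of every intermediate shape) by the eight closed-form D4 coordinate maps applied directly to the parsed point set, one sorted tuple per transform.
import Mathlib
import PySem

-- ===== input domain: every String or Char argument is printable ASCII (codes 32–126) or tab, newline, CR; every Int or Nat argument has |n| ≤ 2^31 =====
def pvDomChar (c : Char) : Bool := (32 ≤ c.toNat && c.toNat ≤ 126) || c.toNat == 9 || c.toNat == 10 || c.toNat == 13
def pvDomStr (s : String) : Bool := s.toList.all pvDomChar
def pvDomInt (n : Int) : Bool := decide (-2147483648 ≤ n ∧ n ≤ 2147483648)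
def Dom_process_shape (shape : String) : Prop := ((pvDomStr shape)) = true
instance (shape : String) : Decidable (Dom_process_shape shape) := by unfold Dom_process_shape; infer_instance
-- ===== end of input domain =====

-- B replaces A's chained rotate()/flip() dict-lookup pipeline by the eight closed-form
-- D4 coordinate maps applied directly to the parsed shape (objective: simpler).

-- ===== PORT A =====
-- both Pythons parse the shape with the same comprehension; shared parsing helper
def pvParse (shape : String) : List (Int × Int) :=
  (PySem.List.enumerate (PySem.List.slice (PySem.Chars.splitOn shape.toList ['\n']) (some 1))).flatMap
    (fun rp => (PySem.List.enumerate rp.2).filterMap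
      (fun cp => if cp.2 = '#' then some (rp.1, cp.1) else none))

def pvRotDict : PySem.Dict (Int × Int) (Int × Int) := PySem.Dict.ofList
  [((0,0),(0,2)), ((0,1),(1,2)), ((0,2),(2,2)),
   ((1,0),(0,1)), ((1,1),(1,1)), ((1,2),(2,1)),
   ((2,0),(0,0)), ((2,1),(1,0)), ((2,2),(2,0))]

def pvFlipDict : PySem.Dict (Int × Int) (Int × Int) := PySem.Dict.ofList
  [((0,0),(0,2)), ((0,1),(0,1)), ((0,2),(0,0)),
   ((1,0),(1,2)), ((1,1),(1,1)), ((1,2),(1,0)),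
   ((2,0),(2,2)), ((2,1),(2,1)), ((2,2),(2,0))]

-- rotate(shape): none = KeyError (a location outside the 3x3 grid), excluded by Pre_
def pvRotate (s : List (Int × Int)) : Option (List (Int × Int)) :=
  (s.mapM (fun loc => PySem.Dict.get? pvRotDict loc)).map
    (fun v => PySem.List.sorted2 v Prod.fst Prod.snd)

-- flip(shape): none = KeyError, excluded by Pre_
def pvFlip (s : List (Int × Int)) : Option (List (Int × Int)) :=
  (s.mapM (fun loc => PySem.Dict.get? pvFlipDict loc)).map
    (fun v => PySem.List.sorted2 v Prod.fst Prod.snd)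

-- the body of A after parsing; the [] branches are the KeyError cases, outside Pre_
def pvCoreA (s0 : List (Int × Int)) : List (List (Int × Int)) :=
  match pvFlip s0 with
  | none => []
  | some f0 =>
    let variants : PySem.Set (List (Int × Int)) := PySem.Set.ofList [s0, f0]
    match (List.range 3).foldl
        (fun (st : Option (List (Int × Int) × PySem.Set (List (Int × Int)))) _ =>
          match st with
          | none => none
          | some (s, v) =>
            match pvRotate s with
            | none => none
            | some s' =>
              match pvFlip s' with
              | none => none
              | some f' => some (s', PySem.Set.add (PySem.Set.add v s') f'))
        (some (s0, variants)) with
    | none => []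
    | some (_, v) => v

def process_shape (shape : String) : List (List (Int × Int)) :=
  pvCoreA (pvParse shape)

-- ===== PORT B =====
def pvTransforms : List ((Int × Int) → (Int × Int)) :=
  [fun p => (p.1, p.2), fun p => (p.1, 2 - p.2),
   fun p => (p.2, 2 - p.1), fun p => (p.2, p.1),
   fun p => (2 - p.1, 2 - p.2), fun p => (2 - p.1, p.2),
   fun p => (2 - p.2, p.1), fun p => (2 - p.2, 2 - p.1)]

def pvCoreB (pts : List (Int × Int)) : List (List (Int × Int)) :=
  PySem.Set.ofList (pvTransforms.map (fun t => PySem.List.sorted2 (pts.map t) Prod.fst Prod.snd))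

def process_shape_alt (shape : String) : List (List (Int × Int)) :=
  pvCoreB (pvParse shape)

-- ===== PRECONDITION & SPEC =====
-- Pre_ holds iff every filled cell of the lines after the first lies in the 3x3 grid
-- (row index < 3, column index < 3); outside that A raises KeyError in rotate/flip.
def Pre_process_shape (shape : String) : Prop :=
  ∀ rp ∈ PySem.List.enumerate ((PySem.Chars.splitOn shape.toList ['\n']).drop 1),
    ∀ cp ∈ PySem.List.enumerate rp.2, cp.2 = '#' → rp.1 < 3 ∧ cp.1 < 3
instance (shape : String) : Decidable (Pre_process_shape shape) := by
  unfold Pre_process_shape; infer_instance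

def pvWitness_process_shape : String := "shape:\n##.\n.#."

def Spec_process_shape (shape : String) (out : List (List (Int × Int))) : Prop := out = process_shape_alt shape
instance (shape : String) (out : List (List (Int × Int))) : Decidable (Spec_process_shape shape out) := by unfold Spec_process_shape; infer_instance

-- ===== CLAIM (what is proved, stated in full; the proofs are below) =====
def Claim_equal_process_shape : Prop := ∀ (shape : String), Dom_process_shape shape → Pre_process_shape shape → Spec_process_shape shape (process_shape shape)

-- ===== LEMMAS AND PROOFS =====

def pvGrid : List (Int × Int) :=
  [(0,0),(0,1),(0,2),(1,0),(1,1),(1,2),(2,0),(2,1),(2,2)]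

-- cores agree on every sublist of the (row-major sorted) 3x3 grid
set_option maxRecDepth 10000 in
theorem pvMain : pvGrid.sublists.all (fun P => pvCoreA P == pvCoreB P) = true := by decide

-- one row of the parse is a sublist of that row of the grid
theorem pvRowSub (row : List Char) (r : Int) :
    ∀ (s : Int), 0 ≤ s →
    (∀ cp ∈ PySem.List.enumerate row s, cp.2 = '#' → cp.1 < 3) →
    ((PySem.List.enumerate row s).filterMap
        (fun cp => if cp.2 = '#' then some (r, cp.1) else none)).Sublist
      ((PySem.List.pyRange s 3).map (fun c => (r, c))) := by
  induction row with
  | nil => intro s _ _; simp [PySem.List.enumerate]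
  | cons x xs ih =>
    intro s hs h
    rw [PySem.List.enumerate_cons]
    by_cases hx : x = '#'
    · have h3 : s < 3 := h (s, x) (List.mem_cons_self) hx
      rw [PySem.List.pyRange_one_cons h3]
      simp only [List.filterMap_cons, hx, List.map_cons]
      exact (ih (s+1) (by omega)
        (fun cp hcp hh => h cp (List.mem_cons_of_mem _ hcp) hh)).cons₂ _
    · simp only [List.filterMap_cons, if_neg hx]
      have tail := ih (s+1) (by omega)
        (fun cp hcp hh => h cp (List.mem_cons_of_mem _ hcp) hh)
      by_cases h3 : s < 3
      · rw [PySem.List.pyRange_one_cons h3]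
        exact tail.cons _
      · have e1 : PySem.List.pyRange s 3 = [] := by
          unfold PySem.List.pyRange; simp [show ¬ s < 3 by omega]
        have e2 : PySem.List.pyRange (s+1) 3 = [] := by
          unfold PySem.List.pyRange; simp [show ¬ s + 1 < 3 by omega]
        rw [e1]; rw [e2] at tail; simpa using tail

-- the whole parse (from row index s on) is a sublist of the grid rows s..2
theorem pvRowsSub (rows : List (List Char)) :
    ∀ (s : Int), 0 ≤ s →
    (∀ rp ∈ PySem.List.enumerate rows s,
      ∀ cp ∈ PySem.List.enumerate rp.2, cp.2 = '#' → rp.1 < 3 ∧ cp.1 < 3) →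
    ((PySem.List.enumerate rows s).flatMap
        (fun rp => (PySem.List.enumerate rp.2).filterMap
          (fun cp => if cp.2 = '#' then some (rp.1, cp.1) else none))).Sublist
      ((PySem.List.pyRange s 3).flatMap (fun r => [(r,0),(r,1),(r,2)])) := by
  induction rows with
  | nil => intro s _ _; simp [PySem.List.enumerate]
  | cons row rows ih =>
    intro s hs h
    rw [PySem.List.enumerate_cons]
    simp only [List.flatMap_cons]
    have tail := ih (s+1) (by omega)
      (fun rp hrp => h rp (List.mem_cons_of_mem _ hrp))
    by_cases h3 : s < 3
    · rw [PySem.List.pyRange_one_cons h3]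
      simp only [List.flatMap_cons]
      have hhead := pvRowSub row s 0 (by omega)
        (fun cp hcp hh => ((h (s, row) List.mem_cons_self cp hcp hh)).2)
      have hmap : (PySem.List.pyRange 0 3).map (fun c => ((s : Int), c)) =
          [(s,0),(s,1),(s,2)] := by
        norm_num [PySem.List.pyRange, show Int.toNat 3 = 3 from rfl, List.range_succ]
      rw [hmap] at hhead
      exact hhead.append tail
    · have e1 : PySem.List.pyRange s 3 = [] := by
        unfold PySem.List.pyRange; simp [show ¬ s < 3 by omega]
      have e2 : PySem.List.pyRange (s+1) 3 = [] := by
        unfold PySem.List.pyRange; simp [show ¬ s + 1 < 3 by omega]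
      rw [e1]
      have hhead : (PySem.List.enumerate row).filterMap
          (fun cp => if cp.2 = '#' then some ((s : Int), cp.1) else none) = [] := by
        rw [List.filterMap_eq_nil_iff]
        intro cp hcp
        by_cases hh : cp.2 = '#'
        · exact absurd ((h (s, row) List.mem_cons_self cp hcp hh)).1 (by omega)
        · simp [hh]
      rw [e2] at tail
      simp only [List.flatMap_nil] at tail ⊢
      simpa [hhead] using tail

theorem pvParseSub (shape : String) (h : Pre_process_shape shape) :
    (pvParse shape).Sublist pvGrid := by
  unfold pvParse
  rw [PySem.List.slice_from (xs := PySem.Chars.splitOn shape.toList ['\n']) (a := 1) (by omega)]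
  have := pvRowsSub ((PySem.Chars.splitOn shape.toList ['\n']).drop (1:Int).toNat) 0 le_rfl
    (fun rp hrp => h rp (by simpa using hrp))
  have hg : (PySem.List.pyRange 0 3).flatMap (fun r => [((r:Int),(0:Int)),(r,1),(r,2)]) = pvGrid := by
    decide
  rw [hg] at this
  exact this

-- ===== VERDICT (by name: the statement is the Claim_ definition above) =====
theorem process_shape_spec : Claim_equal_process_shape := by
  intro shape _ hpre
  show process_shape shape = process_shape_alt shape
  have hmem : pvParse shape ∈ pvGrid.sublists :=
    List.mem_sublists.mpr (pvParseSub shape hpre)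
  have := List.all_eq_true.mp pvMain _ hmem
  exact eq_of_beq this
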